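-- pv_equiv track=rewrite | github.com/mdskrzypczyk/dailyprogramming | heighway/heighway.py | heighway
-- ===== SOURCE A (Python) =====
-- def heighway(degree):
-- 	points = [(0,0),(1,0),(1,1)]
-- 	if degree == 0:
-- 		return (0,0)
--
-- 	for it in range(1,degree):
-- 		rev_points = points[::-1]
-- 		for pair in range(2**it):
-- 			point1,point2 = rev_points[pair:pair+2]
-- 			movement = (point2[1]-point1[1],point2[0]-point1[0])
-- 			new_point = (points[-1][0]+ movement[0],points[-1][1]-movement[1])
-- 			points.append(new_point)
--
-- 	return points
-- ===== SOURCE B (Python) =====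
-- def heighway(degree):
--     points = [(0, 0), (1, 0), (1, 1)]
--     if degree == 0:
--         return (0, 0)
--     for it in range(1, degree):
--         px, py = points[-1]
--         points += [(px + qy - py, py - qx + px) for qx, qy in reversed(points[:-1])]
--     return points
-- ===== Notes on version B (the rewrite author's own statement) =====
-- stated objective: alternative
-- what changed: Each round now takes the pivot (last point) once and maps a fixed 90-degree rotation about it over the reversed prefix, replacing A's per-point two-element slice, 'movement' difference and threaded last-point accumulator.
-- outside the precondition, e.g. on heighway(0): A returns [0, 0], B returns [0, 0]
import Mathlib
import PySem

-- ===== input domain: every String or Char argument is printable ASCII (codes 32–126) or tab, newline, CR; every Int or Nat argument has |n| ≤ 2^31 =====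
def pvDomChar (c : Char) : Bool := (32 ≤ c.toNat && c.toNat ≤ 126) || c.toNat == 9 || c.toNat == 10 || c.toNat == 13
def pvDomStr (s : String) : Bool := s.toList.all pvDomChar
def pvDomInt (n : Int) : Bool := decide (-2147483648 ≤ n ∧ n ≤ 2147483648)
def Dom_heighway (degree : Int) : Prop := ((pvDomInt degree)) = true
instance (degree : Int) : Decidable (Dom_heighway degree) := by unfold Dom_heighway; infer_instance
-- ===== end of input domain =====

-- B replaces A's per-point slice/`movement`/threaded-`last` inner loop by one fixed 90° rotation about a
-- pivot taken once per round; equivalence of the RETURN value on degree ≠ 0 (degree == 0 returns a tuple in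
-- Python, outside the list return type, and is excluded by Pre_).

-- ===== PORT A =====
-- inner loop body: point1,point2 = rev_points[pair:pair+2]; movement = …; points.append(new_point)
def heighwayInner (rev : List (Int × Int)) (pts : List (Int × Int)) (pair : Int) :
    List (Int × Int) :=
  match PySem.List.slice rev (some pair) (some (pair + 2)) with
  | [point1, point2] =>
      let movement := (point2.2 - point1.2, point2.1 - point1.1)
      match PySem.List.pyGet? pts (-1) with          -- points[-1]
      | some last => pts ++ [(last.1 + movement.1, last.2 - movement.2)]
      | none => pts                                   -- IndexError (pts never empty here)
  | _ => pts                                          -- ValueError on unpacking (never reached here)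

-- one iteration of `for it in range(1, degree)`
def heighwayRound (pts : List (Int × Int)) (it : Int) : List (Int × Int) :=
  match PySem.List.slice? pts none none (-1) with     -- rev_points = points[::-1]
  | some rev =>
      (PySem.List.pyRange 0 ((2 : Int) ^ it.toNat) 1).foldl (heighwayInner rev) pts
  | none => pts                                       -- step ≠ 0, never reached

def heighway (degree : Int) : List (Int × Int) :=
  let points : List (Int × Int) := [(0, 0), (1, 0), (1, 1)]
  if degree = 0 then []     -- Python A returns the TUPLE (0,0) here (not a list); excluded by Pre_
  else (PySem.List.pyRange 1 degree 1).foldl heighwayRound points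

-- ===== PORT B =====
-- one iteration: pivot = points[-1]; points += [rotate(q) for q in reversed(points[:-1])]
def heighwayAltRound (pts : List (Int × Int)) (_it : Int) : List (Int × Int) :=
  match PySem.List.pyGet? pts (-1) with               -- px, py = points[-1]
  | some p =>
      pts ++ ((PySem.List.slice pts none (some (-1))).reverse.map
        (fun q => (p.1 + q.2 - p.2, p.2 - q.1 + p.1)))
  | none => pts                                       -- IndexError (pts never empty here)

def heighway_alt (degree : Int) : List (Int × Int) :=
  let points : List (Int × Int) := [(0, 0), (1, 0), (1, 1)]
  if degree = 0 then []     -- Python B returns the same tuple (0,0) as A here; excluded by Pre_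
  else (PySem.List.pyRange 1 degree 1).foldl heighwayAltRound points

-- ===== PRECONDITION & SPEC =====
-- Pre_ excludes degree == 0 only: there A (and B) return the TUPLE (0,0), which is not a value of the
-- declared list-of-pairs return type.
def Pre_heighway (degree : Int) : Prop := degree ≠ 0
instance (degree : Int) : Decidable (Pre_heighway degree) := by unfold Pre_heighway; infer_instance
def pvWitness_heighway : Int := 3

def Spec_heighway (degree : Int) (out : List (Int × Int)) : Prop := out = heighway_alt degree
instance (degree : Int) (out : List (Int × Int)) : Decidable (Spec_heighway degree out) := by
  unfold Spec_heighway; infer_instance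

-- ===== CLAIM (what is proved, stated in full; the proofs are below) =====
def Claim_equal_heighway : Prop :=
  ∀ (degree : Int), Dom_heighway degree → Pre_heighway degree →
    Spec_heighway degree (heighway degree)

-- ===== LEMMAS AND PROOFS =====

-- the rotation B applies about pivot p
def hwRot (p q : Int × Int) : Int × Int := (p.1 + q.2 - p.2, p.2 - q.1 + p.1)

theorem hwRot_self (p : Int × Int) : hwRot p p = p := by
  simp [hwRot]

theorem take_two_drop {α : Type} (l : List α) (m : Nat) (h : m + 1 < l.length) :
    (l.drop m).take 2 = [l[m], l[m + 1]] := by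
  rw [List.drop_eq_getElem_cons (by omega : m < l.length),
      List.drop_eq_getElem_cons (by omega : m + 1 < l.length)]
  rfl

-- telescoping invariant of A's inner loop: after m steps the appended points are exactly
-- the rotation of rev[1..m] about rev[0]
theorem foldA_range (r0 : Int × Int) (rt : List (Int × Int)) (pts : List (Int × Int)) (m : Nat)
    (hm : m ≤ rt.length) (hlast : pts.getLast? = some r0) :
    (PySem.List.pyRange 0 (m : Int) 1).foldl (heighwayInner (r0 :: rt)) pts
      = pts ++ (rt.take m).map (hwRot r0) := by
  induction m with
  | zero => simp [PySem.List.pyRange_one_eq_nil]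
  | succ m ih =>
      have hm' : m ≤ rt.length := by omega
      have hmlt : m < rt.length := by omega
      have : ((m + 1 : Nat) : Int) = (m : Int) + 1 := by push_cast; ring
      rw [this, PySem.List.pyRange_one_succ_right (by positivity), List.foldl_append, ih hm']
      -- evaluate one step of heighwayInner at index m
      have hslice : PySem.List.slice (r0 :: rt) (some (m : Int)) (some ((m : Int) + 2))
          = [(r0 :: rt)[m]'(by simp; omega), (r0 :: rt)[m + 1]'(by simp; omega)] := by
        have h2 : ((m : Int) + 2) = ((m + 2 : Nat) : Int) := by push_cast; ring
        rw [h2, PySem.List.slice_natCast]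
        simp only [show m + 2 - m = 2 from by omega]
        exact take_two_drop _ m (by simp; omega)
      have hlast' : (pts ++ (rt.take m).map (hwRot r0)).getLast? = some (hwRot r0 ((r0 :: rt)[m]'(by simp; omega))) := by
        cases m with
        | zero => simpa [hwRot_self] using hlast
        | succ k =>
            have hk : k < rt.length := by omega
            have htk : ((rt.take (k + 1)).map (hwRot r0)).getLast? = some (hwRot r0 rt[k]) := by
              rw [List.getLast?_eq_getElem?]
              simp [List.length_take, hk]
            have hne2 : (rt.take (k + 1)).map (hwRot r0) ≠ [] := by
              intro hx
              rw [List.map_eq_nil_iff, List.take_eq_nil_iff] at hx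
              rcases hx with h | h
              · omega
              · subst h; simp at hk
            rw [List.getLast?_append_of_ne_nil pts hne2, htk]
            simp
      simp only [List.foldl_cons, List.foldl_nil, heighwayInner, hslice,
        PySem.List.pyGet?_neg_one, hlast']
      rw [List.take_add_one, List.append_assoc]
      congr 1
      simp only [List.getElem?_eq_getElem hmlt, Option.toList_some, List.map_append, List.map_cons,
        List.map_nil]
      congr 1
      simp only [List.getElem_cons_succ, hwRot]
      cases m with
      | zero =>
          simp only [List.getElem_cons_zero, List.cons.injEq, and_true, Prod.mk.injEq]
          constructor <;> ring
      | succ k =>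
          simp only [List.getElem_cons_succ, List.cons.injEq, and_true, Prod.mk.injEq]
          constructor <;> ring

-- one round of A equals one round of B when the list has the expected length 2^it + 1
theorem hwRound_eq (pts : List (Int × Int)) (it : Int)
    (h : pts.length = 2 ^ it.toNat + 1) :
    heighwayRound pts it = heighwayAltRound pts it := by
  have hne : pts ≠ [] := by intro hx; simp [hx] at h
  obtain ⟨r0, hr0⟩ : ∃ r0, pts.getLast? = some r0 := by
    cases hx : pts.getLast? with
    | none => exact absurd (List.getLast?_eq_none_iff.mp hx) hne
    | some r0 => exact ⟨r0, rfl⟩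
  have hrev : pts.reverse = r0 :: pts.dropLast.reverse := by
    conv_lhs => rw [← List.dropLast_append_getLast? r0 hr0]
    simp
  have hlen : pts.dropLast.reverse.length = 2 ^ it.toNat := by
    simp [List.length_dropLast, h]
  unfold heighwayRound heighwayAltRound
  rw [PySem.List.slice?_none_none_neg_one]
  simp only [hrev]
  have hcast : ((2 : Int) ^ it.toNat) = ((2 ^ it.toNat : Nat) : Int) := by push_cast; ring
  rw [hcast, foldA_range r0 _ pts _ (by omega) hr0]
  rw [PySem.List.pyGet?_neg_one, hr0, PySem.List.slice_to_neg_one]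
  rw [List.take_of_length_le (by omega)]
  rfl

-- after the rounds 1..k-1 both folds agree and the list has length 2^k + 1
theorem fold_eq_len (k : Nat) (hk : 1 ≤ k) :
    (PySem.List.pyRange 1 (k : Int) 1).foldl heighwayRound [(0, 0), (1, 0), (1, 1)]
        = (PySem.List.pyRange 1 (k : Int) 1).foldl heighwayAltRound [(0, 0), (1, 0), (1, 1)]
      ∧ ((PySem.List.pyRange 1 (k : Int) 1).foldl heighwayAltRound
          [(0, 0), (1, 0), (1, 1)]).length = 2 ^ k + 1 := by
  induction k with
  | zero => omega
  | succ k ih =>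
      cases Nat.lt_or_ge k 1 with
      | inl h1 =>
          interval_cases k
          constructor
          · simp [PySem.List.pyRange_one_eq_nil]
          · simp [PySem.List.pyRange_one_eq_nil]
      | inr h1 =>
          obtain ⟨iheq, ihlen⟩ := ih h1
          have hstep : ((k + 1 : Nat) : Int) = (k : Int) + 1 := by push_cast; ring
          rw [hstep, PySem.List.pyRange_one_succ_right (by exact_mod_cast h1), List.foldl_append,
            List.foldl_append, iheq]
          set L := (PySem.List.pyRange 1 (k : Int) 1).foldl heighwayAltRound
            [((0 : Int), (0 : Int)), (1, 0), (1, 1)] with hL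
          have hlenL : L.length = 2 ^ k + 1 := ihlen
          have hkint : ((k : Int)).toNat = k := by simp
          have hr : heighwayRound L (k : Int) = heighwayAltRound L (k : Int) := by
            apply hwRound_eq
            rw [hkint]; exact hlenL
          simp only [List.foldl_cons, List.foldl_nil, hr]
          refine ⟨trivial, ?_⟩
          -- length of one B round: len + (len - 1)
          have hneL : L ≠ [] := by intro hx; simp [hx] at hlenL
          unfold heighwayAltRound
          rw [PySem.List.pyGet?_neg_one]
          obtain ⟨r0, hr0⟩ : ∃ r0, L.getLast? = some r0 := by
            cases hx : L.getLast? with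
            | none => exact absurd (List.getLast?_eq_none_iff.mp hx) hneL
            | some r0 => exact ⟨r0, rfl⟩
          rw [hr0]
          simp [PySem.List.slice_to_neg_one, List.length_dropLast, hlenL]
          rw [pow_succ]
          omega

-- ===== VERDICT (by name: the statement is the Claim_ definition above) =====
theorem heighway_spec : Claim_equal_heighway := by
  intro degree _ hpre
  unfold Spec_heighway heighway heighway_alt
  rcases lt_trichotomy degree 0 with hlt | heq | hgt
  · rw [if_neg (by omega), if_neg (by omega),
      PySem.List.pyRange_one_eq_nil (by omega)]
    rfl
  · exact absurd heq hpre
  · rw [if_neg (by omega), if_neg (by omega)]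
    have hk : degree = ((degree.toNat : Nat) : Int) := by omega
    have h1 : 1 ≤ degree.toNat := by omega
    rw [hk]
    exact (fold_eq_len degree.toNat h1).1
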